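-- pv_equiv track=rewrite | github.com/loganzzz7/python-g4g-1-week | uchicago_placement_real/roadtrip.py | roadtrip
-- ===== SOURCE A (Python) =====
-- def roadtrip(vehicle_ranges: list[int], route: list[int]) -> list[int]:
--     """
--     Simulate multiple vehicles on a road trip, determining how many
--     destinations vehicles can reach given fuel capacity
--     and a given route.
--
--     Parameters:
--         vehicle_ranges: A list of integers representing the number of
--                         kilometers each vehicle can travel.
--         route: A list of integers representing the distance to each
--                sequential destination.
--
--     Returns:
--         A list of integers indicating how many stops each vehicle was able to
--         make without refueling.
--     """
--     result = []
--     for vehicle_range in vehicle_ranges: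
--         stops = 0
--         for val in route:
--             if vehicle_range >= val:
--                 vehicle_range -= val
--                 stops += 1
--             else:
--                 break # stop if cant go another dest
--         result.append(stops)
--     return result
-- ===== SOURCE B (Python) =====
-- def roadtrip(vehicle_ranges: list[int], route: list[int]) -> list[int]:
--     # Precompute running maxima of route prefix sums once, then answer each
--     # vehicle with a binary search: stops = bisect_right(maxes, fuel).
--     maxes = []
--     s = 0
--     m = None
--     for d in route:
--         s += d
--         if m is None or s > m:
--             m = s
--         maxes.append(m)
--     result = []
--     for r in vehicle_ranges:
--         lo, hi = 0, len(maxes)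
--         while lo < hi:
--             mid = (lo + hi) // 2
--             if r < maxes[mid]:
--                 hi = mid
--             else:
--                 lo = mid + 1
--         result.append(lo)
--     return result
-- ===== Notes on version B (the rewrite author's own statement) =====
-- stated objective: alternative
-- what changed: Instead of re-simulating the whole route per vehicle, B precomputes the running maxima of the route's prefix sums once and answers each vehicle with a binary search (bisect_right) on that nondecreasing list; it trades A's early break (cheap when vehicles stop immediately) for route preprocessing.
import Mathlib
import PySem

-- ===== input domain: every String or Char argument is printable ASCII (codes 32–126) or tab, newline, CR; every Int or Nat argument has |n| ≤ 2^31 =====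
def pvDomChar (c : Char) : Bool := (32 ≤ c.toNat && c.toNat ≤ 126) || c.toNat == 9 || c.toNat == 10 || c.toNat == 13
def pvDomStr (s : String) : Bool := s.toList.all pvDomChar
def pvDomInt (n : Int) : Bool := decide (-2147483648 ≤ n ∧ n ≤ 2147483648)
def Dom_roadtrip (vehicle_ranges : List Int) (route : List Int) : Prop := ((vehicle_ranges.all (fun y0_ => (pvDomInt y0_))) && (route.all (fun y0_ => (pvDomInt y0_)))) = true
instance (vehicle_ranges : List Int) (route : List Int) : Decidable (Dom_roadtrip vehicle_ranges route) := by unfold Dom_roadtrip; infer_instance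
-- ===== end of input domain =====

-- B replaces A's per-vehicle route re-simulation by one pass building the running
-- maxima of the route's prefix sums plus a binary search per vehicle (alternative).

-- ===== PORT A =====
-- inner `for val in route` loop with its `break`, carrying (vehicle_range, stops)
def roadtripGo (vehicle_range : Int) (route : List Int) (stops : Int) : Int :=
  match route with
  | [] => stops
  | val :: rest =>
    if vehicle_range ≥ val then roadtripGo (vehicle_range - val) rest (stops + 1)
    else stops

def roadtrip (vehicle_ranges : List Int) (route : List Int) : List Int :=
  vehicle_ranges.map (fun vehicle_range => roadtripGo vehicle_range route 0)

-- ===== PORT B =====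
-- the `for d in route` loop of Source B, carrying (s, m)
def buildMaxesGo (s : Int) (m : Option Int) (route : List Int) : List Int :=
  match route with
  | [] => []
  | d :: rest =>
    let s' := s + d
    let m' := match m with
      | none => s'
      | some mm => if s' > mm then s' else mm
    m' :: buildMaxesGo s' (some m') rest

-- the hand-written bisect_right `while lo < hi` loop of Source B
def bisectGo (a : List Int) (x : Int) (lo hi : Nat) : Nat :=
  if lo < hi then
    let mid := (lo + hi) / 2
    if x < a.getD mid 0 then bisectGo a x lo mid
    else bisectGo a x (mid + 1) hi
  else lo
termination_by hi - lo
decreasing_by all_goals omega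

def roadtrip_alt (vehicle_ranges : List Int) (route : List Int) : List Int :=
  let maxes := buildMaxesGo 0 none route
  vehicle_ranges.map (fun r => (bisectGo maxes r 0 maxes.length : Int))

-- ===== PRECONDITION & SPEC =====
def Spec_roadtrip (vehicle_ranges : List Int) (route : List Int) (out : List Int) : Prop := out = roadtrip_alt vehicle_ranges route
instance (vehicle_ranges : List Int) (route : List Int) (out : List Int) : Decidable (Spec_roadtrip vehicle_ranges route out) := by unfold Spec_roadtrip; infer_instance

-- ===== CLAIM (what is proved, stated in full; the proofs are below) =====
def Claim_equal_roadtrip : Prop := ∀ (vehicle_ranges : List Int) (route : List Int), Dom_roadtrip vehicle_ranges route → Spec_roadtrip vehicle_ranges route (roadtrip vehicle_ranges route)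

-- ===== LEMMAS AND PROOFS =====

-- every element of buildMaxesGo s (some mm) route is ≥ mm
theorem buildMaxes_lb (route : List Int) : ∀ (s mm : Int),
    ∀ t ∈ buildMaxesGo s (some mm) route, mm ≤ t := by
  induction route with
  | nil => intro s mm t ht; simp [buildMaxesGo] at ht
  | cons d rest ih =>
    intro s mm t ht
    simp only [buildMaxesGo, List.mem_cons] at ht
    rcases ht with h | h
    · subst h; split <;> omega
    · have := ih (s + d) (if s + d > mm then s + d else mm) t h
      split at this <;> omega

-- the built list is nondecreasing
theorem buildMaxes_sorted (route : List Int) : ∀ (s : Int) (m : Option Int),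
    (buildMaxesGo s m route).Pairwise (· ≤ ·) := by
  induction route with
  | nil => intro s m; simp [buildMaxesGo]
  | cons d rest ih =>
    intro s m
    simp only [buildMaxesGo]
    refine List.pairwise_cons.mpr ⟨?_, ih _ _⟩
    intro t ht
    exact buildMaxes_lb rest _ _ t ht

-- length of takeWhile from pointwise information
theorem takeWhile_length_eq (p : Int → Bool) (a : List Int) (k : Nat)
    (hk : k ≤ a.length)
    (h1 : ∀ i (h : i < k), p (a[i]'(lt_of_lt_of_le h hk)) = true)
    (h2 : k = a.length ∨ ∃ h : k < a.length, p (a[k]'h) = false) :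
    (a.takeWhile p).length = k := by
  induction a generalizing k with
  | nil =>
    simp only [List.length_nil, Nat.le_zero] at hk
    subst hk; simp
  | cons x xs ih =>
    cases k with
    | zero =>
      rcases h2 with h | ⟨h, hp⟩
      · simp at h
      · have hx : p x = false := by simpa using hp
        simp [List.takeWhile_cons, hx]
    | succ n =>
      have hx : p x = true := by simpa using h1 0 (Nat.succ_pos n)
      have hk' : n ≤ xs.length := by simpa using hk
      have h1' : ∀ i (h : i < n), p (xs[i]'(lt_of_lt_of_le h hk')) = true := by
        intro i h; simpa using h1 (i + 1) (by omega)
      have h2' : n = xs.length ∨ ∃ h : n < xs.length, p (xs[n]'h) = false := by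
        rcases h2 with h | ⟨h, hp⟩
        · left; simpa using h
        · right; exact ⟨by simpa using h, by simpa using hp⟩
      have := ih n hk' h1' h2'
      simp [List.takeWhile_cons, hx, this]

-- binary search on a nondecreasing list computes the takeWhile length
theorem bisect_eq (a : List Int) (x : Int) (hs : a.Pairwise (· ≤ ·)) :
    ∀ fuel lo hi, hi - lo ≤ fuel → lo ≤ hi → hi ≤ a.length →
    (∀ i (h : i < a.length), i < lo → a[i] ≤ x) →
    (∀ i (h : i < a.length), hi ≤ i → x < a[i]) →
    bisectGo a x lo hi = (a.takeWhile (fun t => decide (t ≤ x))).length := by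
  have hmono : ∀ i j (hi : i < a.length) (hj : j < a.length), i ≤ j → a[i] ≤ a[j] := by
    intro i j hi hj hij
    rcases Nat.eq_or_lt_of_le hij with h | h
    · subst h; exact le_refl _
    · exact List.pairwise_iff_getElem.mp hs i j hi hj h
  have terminal : ∀ lo, lo ≤ a.length →
      (∀ i (h : i < a.length), i < lo → a[i] ≤ x) →
      (∀ i (h : i < a.length), lo ≤ i → x < a[i]) →
      (a.takeWhile (fun t => decide (t ≤ x))).length = lo := by
    intro lo hlen hlow hhigh
    refine takeWhile_length_eq _ a lo hlen ?_ ?_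
    · intro i h
      simpa using hlow i (lt_of_lt_of_le h hlen) h
    · rcases Nat.eq_or_lt_of_le hlen with h | h
      · left; exact h
      · right; exact ⟨h, by simpa using hhigh lo h (le_refl _)⟩
  intro fuel
  induction fuel with
  | zero =>
    intro lo hi hfuel hle hlen hlow hhigh
    have heq : lo = hi := by omega
    subst heq
    rw [bisectGo]
    simp only [lt_irrefl, if_false]
    exact (terminal lo hlen hlow hhigh).symm
  | succ n ih =>
    intro lo hi hfuel hle hlen hlow hhigh
    rw [bisectGo]
    by_cases hlt : lo < hi
    · simp only [hlt, if_true]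
      have hmidlt : (lo + hi) / 2 < a.length := by omega
      have hget : a.getD ((lo + hi) / 2) 0 = a[(lo + hi) / 2] := List.getD_eq_getElem a 0 hmidlt
      rw [hget]
      by_cases hx : x < a[(lo + hi) / 2]
      · rw [if_pos hx]
        refine ih lo ((lo + hi) / 2) (by omega) (by omega) (by omega) hlow ?_
        intro i h hge
        exact lt_of_lt_of_le hx (hmono _ _ hmidlt h hge)
      · rw [if_neg hx]
        refine ih ((lo + hi) / 2 + 1) hi (by omega) (by omega) hlen ?_ hhigh
        intro i h hlt2
        have : a[i] ≤ a[(lo + hi) / 2] := hmono _ _ h hmidlt (by omega)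
        omega
    · simp only [hlt, if_false]
      have heq : lo = hi := by omega
      subst heq
      exact (terminal lo hlen hlow hhigh).symm

-- A's per-vehicle loop counts the prefix of running maxima that are ≤ the budget
theorem goA_eq_takeWhile (route : List Int) : ∀ (s r0 stops : Int) (m : Option Int),
    (∀ mm, m = some mm → mm ≤ r0) →
    roadtripGo (r0 - s) route stops
      = stops + (((buildMaxesGo s m route).takeWhile (fun t => decide (t ≤ r0))).length : Int) := by
  induction route with
  | nil => intro s r0 stops m _; simp [roadtripGo, buildMaxesGo]
  | cons d rest ih =>
    intro s r0 stops m hm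
    cases m with
    | none =>
      simp only [roadtripGo, buildMaxesGo]
      by_cases hc : r0 - s ≥ d
      · rw [if_pos hc]
        rw [show r0 - s - d = r0 - (s + d) by ring,
            ih (s + d) r0 (stops + 1) (some (s + d)) (by intro mm h; cases h; omega)]
        rw [List.takeWhile_cons, if_pos (by simp only [decide_eq_true_eq]; omega)]
        simp only [List.length_cons]
        push_cast; ring
      · rw [if_neg hc, List.takeWhile_cons, if_neg (by simp only [decide_eq_true_eq]; omega)]
        simp
    | some mm =>
      have hmm : mm ≤ r0 := hm mm rfl
      simp only [roadtripGo, buildMaxesGo]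
      set m' : Int := if s + d > mm then s + d else mm with hm'def
      obtain ⟨hge1, hge2⟩ : s + d ≤ m' ∧ mm ≤ m' := by rw [hm'def]; split <;> omega
      have hor : m' = s + d ∨ m' = mm := by rw [hm'def]; split <;> omega
      by_cases hc : r0 - s ≥ d
      · have hle : m' ≤ r0 := by rcases hor with h | h <;> omega
        rw [if_pos hc]
        rw [show r0 - s - d = r0 - (s + d) by ring,
            ih (s + d) r0 (stops + 1) (some m') (by intro x h; cases h; exact hle)]
        rw [List.takeWhile_cons]
        rw [if_pos (by simpa using hle)]
        simp only [List.length_cons]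
        push_cast; ring
      · have hgt : ¬ m' ≤ r0 := by omega
        rw [if_neg hc, List.takeWhile_cons]
        rw [if_neg (by simpa using hgt)]
        simp

-- ===== VERDICT (by name: the statement is the Claim_ definition above) =====
theorem roadtrip_spec : Claim_equal_roadtrip := by
  intro vehicle_ranges route _
  unfold Spec_roadtrip roadtrip roadtrip_alt
  apply List.map_congr_left
  intro r _
  have hA := goA_eq_takeWhile route 0 r 0 none (by intro mm h; cases h)
  simp only [sub_zero] at hA
  have hB := bisect_eq (buildMaxesGo 0 none route) r
      (buildMaxes_sorted route 0 none)
      ((buildMaxesGo 0 none route).length) 0 ((buildMaxesGo 0 none route).length)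
      (by omega) (Nat.zero_le _) (le_refl _)
      (by intro i h hlt; omega)
      (by intro i h hge; omega)
  rw [hA, hB]
  omega
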